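-- pv_equiv track=rewrite | github.com/the-omega-institute/automath | tools/community-outreach/outreach_pipeline.py | _balanced_json_slice
-- ===== SOURCE A (Python) =====
-- from typing import Any, Optional
--
-- def _balanced_json_slice(text: str, start: int) -> Optional[str]:
--     opening = text[start]
--     closing = "}" if opening == "{" else "]"
--     depth = 0
--     in_string = False
--     escape = False
--     for idx in range(start, len(text)):
--         ch = text[idx]
--         if in_string:
--             if escape:
--                 escape = False
--             elif ch == "\\":
--                 escape = True
--             elif ch == '"':
--                 in_string = False
--             continue
--         if ch == '"':
--             in_string = True
--             continue
--         if ch == opening: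
--             depth += 1
--         elif ch == closing:
--             depth -= 1
--             if depth == 0:
--                 return text[start : idx + 1]
--     return None
-- ===== SOURCE B (Python) =====
-- def _skip_string(text, i):
--     # return index just past the closing unescaped quote of a string literal
--     # whose body starts at i (text may end first; then return an index >= len).
--     n = len(text)
--     while i < n:
--         c = text[i]
--         if c == '"':
--             return i + 1
--         i += 2 if c == "\\" else 1
--     return i
--
--
-- def _bracket_events(text, start, opening, closing):
--     # stage 1: materialize the list of (index, +/-1) bracket events that lie
--     # outside string literals; string bodies are jumped over by _skip_string
--     # and never inspected for brackets.
--     events = []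
--     i, n = start, len(text)
--     while i < n:
--         ch = text[i]
--         if ch == '"':
--             i = _skip_string(text, i + 1)
--         else:
--             if ch == opening:
--                 events.append((i, 1))
--             elif ch == closing:
--                 events.append((i, -1))
--             i += 1
--     return events
--
--
-- def _balanced_json_slice(text, start):
--     opening = text[start]
--     closing = "}" if opening == "{" else "]"
--     # stage 2: prefix-sum the deltas; the slice ends at the first closing
--     # bracket whose running sum reaches 0.
--     depth = 0
--     for i, d in _bracket_events(text, start, opening, closing):
--         depth += d
--         if d < 0 and depth == 0:
--             return text[start : i + 1]
--     return None
-- ===== Notes on version B (the rewrite author's own statement) =====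
-- stated objective: alternative
-- what changed: Replaced A's single for-loop three-flag state machine (depth/in_string/escape) by a two-stage pipeline: a first pass materializes the list of (index, +/-1) bracket events outside string literals (jumping over string bodies with a nested skip), and a second pass prefix-sums those deltas and returns the slice at the first closing bracket where the running sum hits 0.
import Mathlib
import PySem

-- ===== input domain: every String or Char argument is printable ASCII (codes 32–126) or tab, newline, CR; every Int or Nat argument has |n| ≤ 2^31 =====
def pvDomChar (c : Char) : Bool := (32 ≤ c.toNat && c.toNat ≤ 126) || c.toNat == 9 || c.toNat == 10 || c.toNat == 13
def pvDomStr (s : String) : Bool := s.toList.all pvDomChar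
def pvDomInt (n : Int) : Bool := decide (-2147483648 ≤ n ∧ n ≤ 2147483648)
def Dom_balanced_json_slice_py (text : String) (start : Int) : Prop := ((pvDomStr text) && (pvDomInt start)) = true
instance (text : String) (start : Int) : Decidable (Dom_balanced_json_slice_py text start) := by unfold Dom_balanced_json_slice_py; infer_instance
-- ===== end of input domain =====

-- B replaces A's single three-flag state machine by a two-stage pipeline: a first pass
-- materializes the bracket events outside string literals, a second pass prefix-sums them;
-- objective: alternative (same cost, different decomposition).


-- ===== PORT A =====
-- A's for-loop over range(start, len(text)) with state (depth, in_string, escape).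
-- fuel only totalizes the loop (one unit per iteration; the caller supplies enough);
-- the `none` arm of the inner match is likewise a guard (pyGet? is some on every reached index under Pre_).
def aLoop (cs : List Char) (opening closing : Char) (start : Int) :
    Nat → Int → Int → Bool → Bool → Option (List Char)
  | 0, _, _, _, _ => none
  | fuel + 1, idx, depth, instr, esc =>
    if idx < (cs.length : Int) then
      match PySem.List.pyGet? cs idx with
      | none => none
      | some ch =>
        if instr then
          if esc then aLoop cs opening closing start fuel (idx + 1) depth true false
          else if ch = '\\' then aLoop cs opening closing start fuel (idx + 1) depth true true
          else if ch = '"' then aLoop cs opening closing start fuel (idx + 1) depth false false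
          else aLoop cs opening closing start fuel (idx + 1) depth true false
        else if ch = '"' then aLoop cs opening closing start fuel (idx + 1) depth true false
        else if ch = opening then aLoop cs opening closing start fuel (idx + 1) (depth + 1) false false
        else if ch = closing then
          if depth - 1 = 0 then some (PySem.List.slice cs (some start) (some (idx + 1)))
          else aLoop cs opening closing start fuel (idx + 1) (depth - 1) false false
        else aLoop cs opening closing start fuel (idx + 1) depth false false
    else none

def balanced_json_slice_py (text : String) (start : Int) : Option String :=
  match PySem.List.pyGet? text.toList start with
  | none => none  -- text[start] raises IndexError in A; excluded by Pre_
  | some opening =>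
    let closing := if opening = '{' then '}' else ']'
    (aLoop text.toList opening closing start ((text.toList.length : Int) - start).toNat
      start 0 false false).map String.ofList

-- ===== PORT B =====
-- B's _skip_string: advance past a string literal body, two positions over an escape.
-- fuel totalizes the while loop (one unit per iteration; callers supply enough).
def bSkip (cs : List Char) : Nat → Int → Int
  | 0, i => i
  | fuel + 1, i =>
    if i < (cs.length : Int) then
      match PySem.List.pyGet? cs i with
      | none => i  -- totalization guard; unreachable under Pre_
      | some c =>
        if c = '"' then i + 1
        else bSkip cs fuel (i + (if c = '\\' then 2 else 1))
    else i

-- B's stage 1, _bracket_events: the list of (index, ±1) bracket events outside strings.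
def bEvents (cs : List Char) (opening closing : Char) : Nat → Int → List (Int × Int)
  | 0, _ => []
  | fuel + 1, i =>
    if i < (cs.length : Int) then
      match PySem.List.pyGet? cs i with
      | none => []  -- totalization guard; unreachable under Pre_
      | some ch =>
        if ch = '"' then bEvents cs opening closing fuel (bSkip cs fuel (i + 1))
        else if ch = opening then (i, 1) :: bEvents cs opening closing fuel (i + 1)
        else if ch = closing then (i, -1) :: bEvents cs opening closing fuel (i + 1)
        else bEvents cs opening closing fuel (i + 1)
    else []

-- B's stage 2: prefix-sum the deltas; stop at the first closing where the sum is 0.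
def bScan (cs : List Char) (start : Int) : List (Int × Int) → Int → Option (List Char)
  | [], _ => none
  | (i, d) :: rest, depth =>
    let depth' := depth + d
    if d < 0 ∧ depth' = 0 then some (PySem.List.slice cs (some start) (some (i + 1)))
    else bScan cs start rest depth'

def balanced_json_slice_py_alt (text : String) (start : Int) : Option String :=
  match PySem.List.pyGet? text.toList start with
  | none => none  -- text[start] raises IndexError; excluded by Pre_
  | some opening =>
    let closing := if opening = '{' then '}' else ']'
    (bScan text.toList start
      (bEvents text.toList opening closing ((text.toList.length : Int) - start).toNat start)
      0).map String.ofList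

-- ===== PRECONDITION & SPEC =====
-- Pre_ excludes exactly the inputs on which text[start] raises IndexError in A (B raises there too).
def Pre_balanced_json_slice_py (text : String) (start : Int) : Prop :=
  PySem.Raise.InRange text.toList.length start
instance (text : String) (start : Int) : Decidable (Pre_balanced_json_slice_py text start) := by
  unfold Pre_balanced_json_slice_py; infer_instance

def pvWitness_balanced_json_slice_py : String × Int := ("{\"a\": [1]}", 0)

def Spec_balanced_json_slice_py (text : String) (start : Int) (out : Option String) : Prop := out = balanced_json_slice_py_alt text start
instance (text : String) (start : Int) (out : Option String) : Decidable (Spec_balanced_json_slice_py text start out) := by unfold Spec_balanced_json_slice_py; infer_instance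

-- ===== CLAIM (what is proved, stated in full; the proofs are below) =====
def Claim_equal_balanced_json_slice_py : Prop := ∀ (text : String) (start : Int), Dom_balanced_json_slice_py text start → Pre_balanced_json_slice_py text start → Spec_balanced_json_slice_py text start (balanced_json_slice_py text start)

-- ===== LEMMAS AND PROOFS =====

theorem pyGet?_some_of_bounds (cs : List Char) (i : Int)
    (h1 : -(cs.length : Int) ≤ i) (h2 : i < (cs.length : Int)) :
    ∃ ch, PySem.List.pyGet? cs i = some ch := by
  have hin : PySem.Raise.InRange cs.length i := by unfold PySem.Raise.InRange; omega
  cases he : PySem.List.pyGet? cs i with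
  | none => rw [PySem.List.pyGet?_eq_none_iff] at he; exact absurd hin he
  | some ch => exact ⟨ch, rfl⟩

theorem le_bSkip (cs : List Char) : ∀ (fuel : Nat) (i : Int), i ≤ bSkip cs fuel i := by
  intro fuel
  induction fuel with
  | zero => intro i; simp [bSkip]
  | succ fuel ih =>
    intro i
    rw [bSkip]
    split
    · cases PySem.List.pyGet? cs i with
      | none => exact le_refl _
      | some c =>
        simp only
        split
        · omega
        · exact le_trans (by split <;> omega) (ih _)
    · exact le_refl _

-- the result does not depend on the fuel once it covers the remaining characters
theorem bSkip_congr (cs : List Char) : ∀ (f1 f2 : Nat) (i : Int),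
    ((cs.length : Int) - i).toNat ≤ f1 → ((cs.length : Int) - i).toNat ≤ f2 →
    bSkip cs f1 i = bSkip cs f2 i := by
  intro f1
  induction f1 with
  | zero =>
    intro f2 i h1 _
    have h : ¬ i < (cs.length : Int) := by omega
    cases f2 with
    | zero => rfl
    | succ f2 => rw [bSkip, bSkip]; simp [h]
  | succ f1 ih =>
    intro f2 i h1 h2
    by_cases h : i < (cs.length : Int)
    · have hf2 : f2 ≠ 0 := by omega
      obtain ⟨g2, rfl⟩ := Nat.exists_eq_succ_of_ne_zero hf2
      rw [bSkip, bSkip]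
      simp only [h, if_true]
      cases PySem.List.pyGet? cs i with
      | none => rfl
      | some c =>
        simp only
        split
        · rfl
        · exact ih g2 _ (by split <;> omega) (by split <;> omega)
    · cases f2 with
      | zero => rw [bSkip, bSkip]; simp [h]
      | succ f2 => rw [bSkip, bSkip]; simp [h]

theorem aLoop_congr (cs : List Char) (opening closing : Char) (start : Int) :
    ∀ (f1 f2 : Nat) (idx depth : Int) (instr esc : Bool),
    ((cs.length : Int) - idx).toNat ≤ f1 → ((cs.length : Int) - idx).toNat ≤ f2 →
    aLoop cs opening closing start f1 idx depth instr esc =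
      aLoop cs opening closing start f2 idx depth instr esc := by
  intro f1
  induction f1 with
  | zero =>
    intro f2 idx depth instr esc h1 _
    have h : ¬ idx < (cs.length : Int) := by omega
    cases f2 with
    | zero => rfl
    | succ f2 => rw [aLoop, aLoop]; simp [h]
  | succ f1 ih =>
    intro f2 idx depth instr esc h1 h2
    by_cases h : idx < (cs.length : Int)
    · have hf2 : f2 ≠ 0 := by omega
      obtain ⟨g2, rfl⟩ := Nat.exists_eq_succ_of_ne_zero hf2
      rw [aLoop, aLoop]
      simp only [h, if_true]
      cases PySem.List.pyGet? cs idx with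
      | none => rfl
      | some ch =>
        simp only
        split_ifs <;>
          first
            | rfl
            | exact ih g2 _ _ _ _ (by omega) (by omega)
    · cases f2 with
      | zero => rw [aLoop, aLoop]; simp [h]
      | succ f2 => rw [aLoop, aLoop]; simp [h]

-- A's in-string states run exactly to the index bSkip computes, then continue out-of-string.
theorem aLoop_instr (cs : List Char) (opening closing : Char) (start : Int) :
    ∀ (fuel : Nat) (idx depth : Int), ((cs.length : Int) - idx).toNat ≤ fuel →
      -(cs.length : Int) ≤ idx →
      aLoop cs opening closing start fuel idx depth true false =
        aLoop cs opening closing start fuel (bSkip cs fuel idx) depth false false := by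
  intro fuel
  induction fuel using Nat.strong_induction_on with
  | _ fuel ih =>
    intro idx depth hn hge
    match fuel with
    | 0 =>
      rfl
    | g + 1 =>
      by_cases h : idx < (cs.length : Int)
      · obtain ⟨ch, hch⟩ := pyGet?_some_of_bounds cs idx hge h
        rw [aLoop, bSkip]
        simp only [h, if_true, hch]
        have hne : ('\\' : Char) ≠ '"' := by decide
        by_cases hq : ch = '"'
        · have hbs : ch ≠ '\\' := by rw [hq]; exact fun he => hne he.symm
          simp only [hq, if_true, if_false, Bool.false_eq_true]
          exact aLoop_congr cs opening closing start g (g + 1) (idx + 1) depth false false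
            (by omega) (by omega)
        · by_cases hbs : ch = '\\'
          · simp only [hbs, hne, if_true, if_false, Bool.false_eq_true]
            by_cases h1 : idx + 1 < (cs.length : Int)
            · have hg : g ≠ 0 := by omega
              obtain ⟨g', rfl⟩ := Nat.exists_eq_succ_of_ne_zero hg
              rw [aLoop]
              simp only [h1, if_true]
              obtain ⟨ch1, hch1⟩ := pyGet?_some_of_bounds cs (idx + 1) (by omega) h1
              rw [hch1]
              simp only
              have h12 : idx + 1 + 1 = idx + 2 := by ring
              rw [h12, ih g' (by omega) (idx + 2) depth (by omega) (by omega)]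
              rw [bSkip_congr cs g' (g' + 1) (idx + 2) (by omega) (by omega)]
              exact aLoop_congr cs opening closing start g' (g' + 2) _ depth false false
                (by have := le_bSkip cs (g' + 1) (idx + 2); omega)
                (by have := le_bSkip cs (g' + 1) (idx + 2); omega)
            · -- escape at the last character: both runs fall off the end
              have h2 : ¬ idx + 2 < (cs.length : Int) := by omega
              have hskip : bSkip cs g (idx + 2) = idx + 2 := by
                cases g with
                | zero => rfl
                | succ g => rw [bSkip]; simp [h2]
              have hstop1 : aLoop cs opening closing start g (idx + 1) depth true true = none := by
                cases g with
                | zero => rfl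
                | succ g => rw [aLoop]; simp [h1]
              have hstop2 :
                  aLoop cs opening closing start (g + 1) (idx + 2) depth false false = none := by
                rw [aLoop]; simp [h2]
              rw [hstop1, hskip, hstop2]
          · simp only [hq, hbs, if_false, Bool.false_eq_true]
            rw [ih g (by omega) (idx + 1) depth (by omega) (by omega)]
            rw [bSkip_congr cs g (g + 1) (idx + 1) (by omega) (by omega)]
            exact aLoop_congr cs opening closing start g (g + 1) _ depth false false
              (by have := le_bSkip cs (g + 1) (idx + 1); omega)
              (by have := le_bSkip cs (g + 1) (idx + 1); omega)
      · have hskip : bSkip cs (g + 1) idx = idx := by rw [bSkip]; simp [h]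
        have hstop : ∀ instr esc,
            aLoop cs opening closing start (g + 1) idx depth instr esc = none := by
          intro instr esc; rw [aLoop]; simp [h]
        rw [hskip, hstop, hstop]

-- out of strings, A's state machine computes exactly B's scan over B's event list
theorem aLoop_eq_scan (cs : List Char) (opening closing : Char) (start : Int) :
    ∀ (fuel : Nat) (idx depth : Int), ((cs.length : Int) - idx).toNat ≤ fuel →
      -(cs.length : Int) ≤ idx →
      aLoop cs opening closing start fuel idx depth false false =
        bScan cs start (bEvents cs opening closing fuel idx) depth := by
  intro fuel
  induction fuel using Nat.strong_induction_on with
  | _ fuel ih =>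
    intro idx depth hn hge
    match fuel with
    | 0 => rfl
    | g + 1 =>
      by_cases h : idx < (cs.length : Int)
      · obtain ⟨ch, hch⟩ := pyGet?_some_of_bounds cs idx hge h
        rw [aLoop, bEvents]
        simp only [h, if_true, hch]
        by_cases hq : ch = '"'
        · simp only [hq, if_true, Bool.false_eq_true]
          rw [aLoop_instr cs opening closing start g (idx + 1) depth (by omega) (by omega)]
          have hle := le_bSkip cs g (idx + 1)
          exact ih g (by omega) (bSkip cs g (idx + 1)) depth (by omega) (by omega)
        · by_cases ho : ch = opening
          · simp only [hq, if_false, Bool.false_eq_true, if_pos ho]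
            rw [ih g (by omega) (idx + 1) (depth + 1) (by omega) (by omega)]
            rw [bScan]
            have hc : ¬ ((1 : Int) < 0 ∧ depth + 1 = 0) := by omega
            rw [if_neg hc]
          · by_cases hc : ch = closing
            · simp only [hq, ho, if_false, Bool.false_eq_true, if_pos hc]
              rw [bScan]
              by_cases hd : depth - 1 = 0
              · have hcond : ((-1 : Int) < 0 ∧ depth + -1 = 0) := by omega
                rw [if_pos hcond]
                simp [hd]
              · have hcond : ¬ ((-1 : Int) < 0 ∧ depth + -1 = 0) := by omega
                rw [if_neg hcond]
                simp only [hd, if_false]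
                have hd1 : depth + -1 = depth - 1 := by ring
                rw [hd1]
                exact ih g (by omega) (idx + 1) (depth - 1) (by omega) (by omega)
            · simp only [hq, ho, hc, if_false]
              exact ih g (by omega) (idx + 1) depth (by omega) (by omega)
      · rw [aLoop, bEvents]; simp [h, bScan]

-- ===== VERDICT (by name: the statement is the Claim_ definition above) =====
theorem balanced_json_slice_py_spec : Claim_equal_balanced_json_slice_py := by
  intro text start _ hpre
  unfold Spec_balanced_json_slice_py balanced_json_slice_py balanced_json_slice_py_alt
  unfold Pre_balanced_json_slice_py PySem.Raise.InRange at hpre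
  obtain ⟨opening, hop⟩ := pyGet?_some_of_bounds text.toList start (by omega) (by omega)
  simp only [hop]
  rw [aLoop_eq_scan text.toList _ _ start ((text.toList.length : Int) - start).toNat
    start 0 (le_refl _) (by omega)]
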